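-- pv_equiv track=rewrite | github.com/zawie/PhyloDL | ML/treeClassifier.py | getDeepestPair
-- ===== SOURCE A (Python) =====
-- branch_stuff = set([":",".","0","1","2","3","4","5","6","7","8","9","e","-","(",")"])
--
-- def getDeepestPair(tree,open_threshold=2):
--     open_count = 0
--     coma_count = 0
--     A = ""
--     B = ""
--     for char in tree:
--         if open_count == open_threshold:
--             if char == ",":
--                 coma_count +=1
--             elif char == ")":
--                 break
--             elif char not in branch_stuff:
--                 if coma_count == 0:
--                     A += char
--                 elif coma_count == 1:
--                     B += char
--         elif char == "(":
--             open_count += 1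
--     return frozenset((A,B))
-- ===== SOURCE B (Python) =====
-- branch_stuff = set([":",".","0","1","2","3","4","5","6","7","8","9","e","-","(",")"])
--
-- def _clean(field):
--     return "".join(c for c in field if c not in branch_stuff)
--
-- def _pair_in(rest):
--     # rest starts right after the open_threshold-th '('; the region runs to the
--     # first ')' (or the end of the string); only its first two ','-fields matter.
--     j = rest.find(")")
--     inner = rest if j < 0 else rest[:j]
--     k = inner.find(",")
--     if k < 0:
--         return frozenset((_clean(inner), ""))
--     second = inner[k + 1:]
--     k2 = second.find(",")
--     if k2 >= 0:
--         second = second[:k2]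
--     return frozenset((_clean(inner[:k]), _clean(second)))
--
-- def getDeepestPair(tree, open_threshold=2):
--     # A counter starting at 0 can never reach a negative threshold.
--     if open_threshold < 0:
--         return frozenset(("", ""))
--     rest = tree
--     for _ in range(open_threshold):
--         i = rest.find("(")
--         if i < 0:
--             return frozenset(("", ""))
--         rest = rest[i + 1:]
--     return _pair_in(rest)
-- ===== Notes on version B (the rewrite author's own statement) =====
-- stated objective: faster
-- what changed: Replaces A's per-character Python state machine (open/comma counters with branching on every character) by a phase decomposition: repeated substring find plus slicing locates the region after the threshold-th opening parenthesis, another find cuts the region at its closing parenthesis, and two more find/slice steps split off the first two fields, each cleaned by one filtering join.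
import Mathlib
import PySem

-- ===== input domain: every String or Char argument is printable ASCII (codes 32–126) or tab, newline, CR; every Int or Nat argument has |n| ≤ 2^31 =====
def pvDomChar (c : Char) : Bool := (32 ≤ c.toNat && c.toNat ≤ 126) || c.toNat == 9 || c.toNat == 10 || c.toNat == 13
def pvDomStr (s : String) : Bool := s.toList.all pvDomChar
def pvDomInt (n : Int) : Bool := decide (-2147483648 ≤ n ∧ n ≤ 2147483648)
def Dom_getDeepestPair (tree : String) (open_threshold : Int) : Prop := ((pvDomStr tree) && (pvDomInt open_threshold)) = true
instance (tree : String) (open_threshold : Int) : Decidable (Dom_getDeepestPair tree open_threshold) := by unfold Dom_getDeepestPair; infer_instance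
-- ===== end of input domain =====

set_option maxHeartbeats 1000000


-- B locates the region boundaries with find/slice and splits it into fields instead of
-- running A's character-by-character counter state machine (objective: faster, measured).

def pvBranchStuff : PySem.Set Char :=
  PySem.Set.ofList [':', '.', '0', '1', '2', '3', '4', '5', '6', '7', '8', '9', 'e', '-', '(', ')']

-- ===== PORT A =====
def pvGoA (th : Int) : List Char → Int → Int → List Char → List Char → List Char × List Char
  | [], _, _, a, b => (a, b)
  | c :: cs, oc, cc, a, b =>
    if oc == th then
      if c == ',' then pvGoA th cs oc (cc + 1) a b
      else if c == ')' then (a, b)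
      else if !(PySem.Set.contains pvBranchStuff c) then
        if cc == 0 then pvGoA th cs oc cc (a ++ [c]) b
        else if cc == 1 then pvGoA th cs oc cc a (b ++ [c])
        else pvGoA th cs oc cc a b
      else pvGoA th cs oc cc a b
    else if c == '(' then pvGoA th cs (oc + 1) cc a b
    else pvGoA th cs oc cc a b

def getDeepestPair (tree : String) (open_threshold : Int) : List String :=
  let r := pvGoA open_threshold tree.toList 0 0 [] []
  PySem.Set.ofList [String.ofList r.1, String.ofList r.2]

-- ===== PORT B =====
-- '"".join(c for c in field if c not in branch_stuff)': the kept characters, joined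
def pvClean (field : String) : String :=
  String.ofList (field.toList.filter (fun c => !(PySem.Set.contains pvBranchStuff c)))

-- Source B's _pair_in: cut the region at the first ')' and split off its first two ','-fields
def pvPairIn (rest : String) : List String :=
  let j := PySem.Str.find rest ")"
  let inner := if j < 0 then rest else PySem.Str.slice rest none (some j)
  let k := PySem.Str.find inner ","
  if k < 0 then PySem.Set.ofList [pvClean inner, ""]
  else
    let second := PySem.Str.slice inner (some (k + 1)) none
    let k2 := PySem.Str.find second ","
    let second' := if k2 ≥ 0 then PySem.Str.slice second none (some k2) else second
    PySem.Set.ofList [pvClean (PySem.Str.slice inner none (some k)), pvClean second']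

-- the 'for _ in range(open_threshold)' loop of Source B (early return on a failed find)
def pvSkip : Nat → String → Option String
  | 0, rest => some rest
  | n + 1, rest =>
    let i := PySem.Str.find rest "("
    if i < 0 then none
    else pvSkip n (PySem.Str.slice rest (some (i + 1)) none)

def getDeepestPair_alt (tree : String) (open_threshold : Int) : List String :=
  if open_threshold < 0 then PySem.Set.ofList ["", ""]
  else
    match pvSkip open_threshold.toNat tree with
    | none => PySem.Set.ofList ["", ""]
    | some rest => pvPairIn rest

-- ===== PRECONDITION & SPEC =====
def Spec_getDeepestPair (tree : String) (open_threshold : Int) (out : List String) : Prop := out = getDeepestPair_alt tree open_threshold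
instance (tree : String) (open_threshold : Int) (out : List String) : Decidable (Spec_getDeepestPair tree open_threshold out) := by unfold Spec_getDeepestPair; infer_instance

-- ===== CLAIM (what is proved, stated in full; the proofs are below) =====
def Claim_equal_getDeepestPair : Prop := ∀ (tree : String) (open_threshold : Int), Dom_getDeepestPair tree open_threshold → Spec_getDeepestPair tree open_threshold (getDeepestPair tree open_threshold)

-- ===== LEMMAS AND PROOFS =====

-- the keep-predicate of the filter branch
def pvP (c : Char) : Bool := !(PySem.Set.contains pvBranchStuff c)

-- filtered first field of the region (up to the first ',' or ')')
def pvF0 : List Char → List Char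
  | [] => []
  | c :: cs => if c = ')' ∨ c = ',' then [] else if pvP c then c :: pvF0 cs else pvF0 cs

-- filtered second field of the region
def pvF1 : List Char → List Char
  | [] => []
  | c :: cs => if c = ')' then [] else if c = ',' then pvF0 cs else pvF1 cs

-- list-level version of B's skipping loop
def pvSkipL : Nat → List Char → Option (List Char)
  | 0, l => some l
  | n + 1, l => if '(' ∈ l then pvSkipL n ((l.dropWhile (· != '(')).tail) else none

-- == single-character find characterisation ==

theorem pv_prefix_single {c : Char} {m : List Char} : [c] <+: m ↔ m.head? = some c := by
  cases m with
  | nil => simp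
  | cons x xs => simp [List.cons_prefix_cons, eq_comm]

theorem pv_infix_single {c : Char} {l : List Char} : [c] <:+: l ↔ c ∈ l := by
  constructor
  · intro h; exact List.singleton_sublist.mp h.sublist
  · intro h
    obtain ⟨s, t, rfl⟩ := List.append_of_mem h
    exact ⟨s, t, by simp⟩

theorem pv_find_single_neg {c : Char} {l : List Char} (h : c ∉ l) :
    PySem.Chars.find l [c] = -1 := by
  have h1 : ¬ 0 ≤ PySem.Chars.find l [c] := by
    intro h0
    exact h (pv_infix_single.mp ((PySem.Chars.find_nonneg_iff (s := l) (sub := [c])).mp h0))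
  have h2 : -1 ≤ PySem.Chars.find l [c] := PySem.Chars.neg_one_le_find (s := l) (sub := [c])
  omega

theorem pv_take_drop_of_first {c : Char} : ∀ (l : List Char) (n : Nat), l[n]? = some c →
    (∀ i, i < n → l[i]? ≠ some c) →
    l.take n = l.takeWhile (· != c) ∧ l.drop (n + 1) = (l.dropWhile (· != c)).tail := by
  intro l
  induction l with
  | nil => intro n h _; simp at h
  | cons x xs ih =>
    intro n hn hmin
    cases n with
    | zero =>
      simp only [List.getElem?_cons_zero, Option.some.injEq] at hn
      subst hn
      constructor
      · simp [List.takeWhile_cons]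
      · simp [List.dropWhile_cons]
    | succ n =>
      have hx : x ≠ c := by
        have := hmin 0 (Nat.succ_pos n); simpa using this
      have hxs := ih n (by simpa using hn) (fun i hi => by
        have := hmin (i + 1) (Nat.succ_lt_succ hi); simpa using this)
      constructor
      · simp [List.takeWhile_cons, hx, hxs.1]
      · simpa [List.dropWhile_cons, hx] using hxs.2

theorem pv_find_single_pos {c : Char} {l : List Char} (h : c ∈ l) :
    0 ≤ PySem.Chars.find l [c] ∧
    l.take (PySem.Chars.find l [c]).toNat = l.takeWhile (· != c) ∧
    l.drop ((PySem.Chars.find l [c]).toNat + 1) = (l.dropWhile (· != c)).tail := by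
  have hinf : [c] <:+: l := pv_infix_single.mpr h
  have h0 : 0 ≤ PySem.Chars.find l [c] :=
    (PySem.Chars.find_nonneg_iff (s := l) (sub := [c])).mpr hinf
  obtain ⟨hpre, hmin⟩ := PySem.Chars.find_spec h0
  have hn : l[(PySem.Chars.find l [c]).toNat]? = some c := by
    have := pv_prefix_single.mp hpre
    rwa [List.head?_drop] at this
  have hmin' : ∀ i, i < (PySem.Chars.find l [c]).toNat → l[i]? ≠ some c := by
    intro i hi hic
    exact hmin i hi (pv_prefix_single.mpr (by rwa [List.head?_drop]))
  exact ⟨h0, (pv_take_drop_of_first l _ hn hmin').1, (pv_take_drop_of_first l _ hn hmin').2⟩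

-- == region characterisation of A ==

theorem pv_region (th : Int) : ∀ (l : List Char) (cc : Int) (a b : List Char), 0 ≤ cc →
    pvGoA th l th cc a b =
      if cc = 0 then (a ++ pvF0 l, b ++ pvF1 l)
      else if cc = 1 then (a, b ++ pvF0 l)
      else (a, b) := by
  intro l
  induction l with
  | nil =>
    intro cc a b _
    simp only [pvGoA, pvF0, pvF1]
    split_ifs <;> simp
  | cons c cs ih =>
    intro cc a b hcc
    have step : pvGoA th (c :: cs) th cc a b =
        if c == ',' then pvGoA th cs th (cc + 1) a b
        else if c == ')' then (a, b)
        else if pvP c then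
          if cc == 0 then pvGoA th cs th cc (a ++ [c]) b
          else if cc == 1 then pvGoA th cs th cc a (b ++ [c])
          else pvGoA th cs th cc a b
        else pvGoA th cs th cc a b := by
      simp [pvGoA, pvP]
    rw [step]
    by_cases h1 : c = ','
    · subst h1
      rw [if_pos (by simp)]
      rw [ih (cc + 1) a b (by omega)]
      rcases (show cc = 0 ∨ cc = 1 ∨ 2 ≤ cc by omega) with h | h | h
      · subst h; simp [pvF0, pvF1]
      · subst h; norm_num [pvF0, pvF1]
      · have e0 : cc + 1 ≠ 0 := by omega
        have e1 : cc + 1 ≠ 1 := by omega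
        have e2 : cc ≠ 0 := by omega
        have e3 : cc ≠ 1 := by omega
        simp [e0, e1, e2, e3]
    · by_cases h2 : c = ')'
      · subst h2
        rw [if_neg (by simp), if_pos (by simp)]
        rcases (show cc = 0 ∨ cc = 1 ∨ 2 ≤ cc by omega) with h | h | h
        · subst h; simp [pvF0, pvF1]
        · subst h; norm_num [pvF0, pvF1]
        · have e2 : cc ≠ 0 := by omega
          have e3 : cc ≠ 1 := by omega
          simp [e2, e3]
      · rw [if_neg (by simp [h1]), if_neg (by simp [h2])]
        have hF0 : pvF0 (c :: cs) = if pvP c then c :: pvF0 cs else pvF0 cs := by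
          simp [pvF0, h1, h2]
        have hF1 : pvF1 (c :: cs) = pvF1 cs := by
          simp [pvF1, h1, h2]
        by_cases hp : pvP c
        · rw [if_pos (by simp [hp])]
          rcases (show cc = 0 ∨ cc = 1 ∨ 2 ≤ cc by omega) with h | h | h
          · subst h
            rw [if_pos (by simp)]
            rw [ih 0 (a ++ [c]) b (by omega)]
            simp [hF0, hF1, hp]
          · subst h
            rw [if_neg (by simp), if_pos (by simp)]
            rw [ih 1 a (b ++ [c]) (by omega)]
            simp [hF0, hF1, hp]
          · have e2 : cc ≠ 0 := by omega
            have e3 : cc ≠ 1 := by omega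
            rw [if_neg (by simp [e2]), if_neg (by simp [e3])]
            rw [ih cc a b hcc]
            simp [e2, e3]
        · rw [if_neg (by simpa using hp)]
          rw [ih cc a b hcc]
          have hp' : pvP c = false := by simpa using hp
          rcases (show cc = 0 ∨ cc = 1 ∨ 2 ≤ cc by omega) with h | h | h
          · subst h; simp [hF0, hF1, hp']
          · subst h; simp [hF0, hF1, hp']
          · have e2 : cc ≠ 0 := by omega
            have e3 : cc ≠ 1 := by omega
            simp [e2, e3]

-- == A's skipping phase ==

theorem pv_skipA (th : Int) : ∀ (l : List Char) (oc : Int), oc < th →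
    pvGoA th l oc 0 [] [] =
      if '(' ∈ l then pvGoA th ((l.dropWhile (· != '(')).tail) (oc + 1) 0 [] []
      else ([], []) := by
  intro l
  induction l with
  | nil => intro oc h; simp [pvGoA]
  | cons c cs ih =>
    intro oc h
    have hne : (oc == th) = false := by simp; omega
    by_cases hc : c = '('
    · subst hc
      have step : pvGoA th ('(' :: cs) oc 0 [] [] = pvGoA th cs (oc + 1) 0 [] [] := by
        simp [pvGoA, hne]
      rw [step]
      simp [List.dropWhile_cons]
    · have hc' : ¬ ('(' = c) := fun hh => hc hh.symm
      have step : pvGoA th (c :: cs) oc 0 [] [] = pvGoA th cs oc 0 [] [] := by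
        simp [pvGoA, hne, hc]
      rw [step, ih oc h]
      simp [List.mem_cons, hc', List.dropWhile_cons, hc]

theorem pv_neg (th : Int) (h : th < 0) : ∀ (l : List Char) (oc : Int), 0 ≤ oc →
    pvGoA th l oc 0 [] [] = ([], []) := by
  intro l
  induction l with
  | nil => intro oc _; simp [pvGoA]
  | cons c cs ih =>
    intro oc hoc
    have hne : (oc == th) = false := by simp; omega
    by_cases hc : c = '('
    · subst hc
      have step : pvGoA th ('(' :: cs) oc 0 [] [] = pvGoA th cs (oc + 1) 0 [] [] := by
        simp [pvGoA, hne]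
      rw [step]; exact ih (oc + 1) (by omega)
    · have step : pvGoA th (c :: cs) oc 0 [] [] = pvGoA th cs oc 0 [] [] := by
        simp [pvGoA, hne, hc]
      rw [step]; exact ih oc hoc

theorem pv_master : ∀ (n : Nat) (l : List Char) (oc th : Int), th = oc + (n : Int) →
    pvGoA th l oc 0 [] [] =
      match pvSkipL n l with
      | none => ([], [])
      | some r => (pvF0 r, pvF1 r) := by
  intro n
  induction n with
  | zero =>
    intro l oc th hth
    have : oc = th := by omega
    subst this
    simpa [pvSkipL] using pv_region oc l 0 [] [] le_rfl
  | succ n ih =>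
    intro l oc th hth
    rw [pv_skipA th l oc (by omega)]
    by_cases hm : '(' ∈ l
    · rw [if_pos hm, ih _ (oc + 1) th (by push_cast at hth ⊢; omega)]
      simp [pvSkipL, hm]
    · rw [if_neg hm]
      simp [pvSkipL, hm]

-- == B's phases against pvF0 / pvF1 ==

theorem pv_F0_eq (l : List Char) :
    pvF0 l = ((l.takeWhile (· != ')')).takeWhile (· != ',')).filter pvP := by
  induction l with
  | nil => simp [pvF0]
  | cons c cs ih =>
    by_cases h1 : c = ')'
    · subst h1; simp [pvF0, List.takeWhile_cons]
    · by_cases h2 : c = ','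
      · subst h2; simp [pvF0, List.takeWhile_cons]
      · simp [pvF0, List.takeWhile_cons, h1, h2, List.filter_cons, ih]

theorem pv_F1_eq (l : List Char) :
    pvF1 l =
      if ',' ∈ l.takeWhile (· != ')') then
        ((((l.takeWhile (· != ')')).dropWhile (· != ',')).tail).takeWhile (· != ',')).filter pvP
      else [] := by
  induction l with
  | nil => simp [pvF1]
  | cons c cs ih =>
    by_cases h1 : c = ')'
    · subst h1; simp [pvF1, List.takeWhile_cons]
    · by_cases h2 : c = ','
      · subst h2
        simp [pvF1, List.takeWhile_cons, List.dropWhile_cons, pv_F0_eq]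
      · have h2' : ¬ (',' = c) := fun hh => h2 hh.symm
        simp only [pvF1, if_neg h1, if_neg h2]
        rw [ih]
        simp [List.takeWhile_cons, h1, h2, List.dropWhile_cons, List.mem_cons, h2']

theorem pv_skip_eq : ∀ (n : Nat) (s : String),
    pvSkip n s = Option.map String.ofList (pvSkipL n s.toList) := by
  intro n
  induction n with
  | zero => intro s; simp [pvSkip, pvSkipL]
  | succ n ih =>
    intro s
    have hfs : PySem.Str.find s "(" = PySem.Chars.find s.toList ['('] := by simp
    by_cases hm : '(' ∈ s.toList
    · have h0 : 0 ≤ PySem.Chars.find s.toList ['('] := (pv_find_single_pos hm).1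
      have harg : (PySem.Str.slice s (some (PySem.Str.find s "(" + 1)) none).toList
          = (s.toList.dropWhile (· != '(')).tail := by
        rw [hfs]
        have hdrop := (pv_find_single_pos hm).2.2
        have hsl : (PySem.Str.slice s (some (PySem.Chars.find s.toList ['('] + 1)) none).toList
            = PySem.List.slice s.toList (some (PySem.Chars.find s.toList ['('] + 1)) none := by simp
        rw [hsl, PySem.List.slice_from _ (by omega),
          show (PySem.Chars.find s.toList ['('] + 1).toNat
            = (PySem.Chars.find s.toList ['(']).toNat + 1 by omega]
        exact hdrop
      simp only [pvSkip, pvSkipL, hfs, if_pos hm]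
      rw [if_neg (by omega)]
      rw [show PySem.Chars.find s.toList ['('] = PySem.Str.find s "(" from hfs.symm]
      rw [ih, harg]
    · have hneg : PySem.Chars.find s.toList ['('] = -1 := pv_find_single_neg hm
      simp only [pvSkip, pvSkipL, hfs, hneg, if_neg hm]
      norm_num

-- proof-side view of pvPairIn's body after the inner string is fixed
def pvTail (inner : String) : List String :=
  let k := PySem.Str.find inner ","
  if k < 0 then PySem.Set.ofList [pvClean inner, ""]
  else
    let second := PySem.Str.slice inner (some (k + 1)) none
    let k2 := PySem.Str.find second ","
    let second' := if k2 ≥ 0 then PySem.Str.slice second none (some k2) else second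
    PySem.Set.ofList [pvClean (PySem.Str.slice inner none (some k)), pvClean second']

theorem pv_clean_eq (x : String) : pvClean x = String.ofList (x.toList.filter pvP) := rfl

theorem pv_takeWhile_self_of_not_mem {c : Char} {l : List Char} (h : c ∉ l) :
    l.takeWhile (· != c) = l := by
  rw [List.takeWhile_eq_self_iff.mpr]
  intro x hx
  simp only [bne_iff_ne, ne_eq]
  intro hxe; subst hxe; exact h hx

theorem pv_tail_eq (inner : String) :
    pvTail inner = PySem.Set.ofList
      [String.ofList ((inner.toList.takeWhile (· != ',')).filter pvP),
       String.ofList (if ',' ∈ inner.toList then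
          ((((inner.toList.dropWhile (· != ',')).tail)).takeWhile (· != ',')).filter pvP
        else [])] := by
  have hf : PySem.Str.find inner "," = PySem.Chars.find inner.toList [','] := by simp
  by_cases hm : ',' ∈ inner.toList
  · obtain ⟨h0, htake, hdrop⟩ := pv_find_single_pos (l := inner.toList) hm
    have hx1 : (PySem.Str.slice inner none (some (PySem.Str.find inner ","))).toList
        = inner.toList.takeWhile (· != ',') := by
      rw [show (PySem.Str.slice inner none (some (PySem.Str.find inner ","))).toList
          = PySem.List.slice inner.toList none (some (PySem.Chars.find inner.toList [','])) from by
            rw [hf]; simp]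
      rw [PySem.List.slice_to _ h0]
      exact htake
    have hx2 : (PySem.Str.slice inner (some (PySem.Str.find inner "," + 1)) none).toList
        = (inner.toList.dropWhile (· != ',')).tail := by
      rw [show (PySem.Str.slice inner (some (PySem.Str.find inner "," + 1)) none).toList
          = PySem.List.slice inner.toList (some (PySem.Chars.find inner.toList [','] + 1)) none from by
            rw [hf]; simp]
      rw [PySem.List.slice_from _ (by omega),
        show (PySem.Chars.find inner.toList [','] + 1).toNat
          = (PySem.Chars.find inner.toList [',']).toNat + 1 by omega]
      exact hdrop
    have hf2 : PySem.Str.find (PySem.Str.slice inner (some (PySem.Str.find inner "," + 1)) none) ","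
        = PySem.Chars.find ((inner.toList.dropWhile (· != ',')).tail) [','] := by
      rw [show PySem.Str.find (PySem.Str.slice inner (some (PySem.Str.find inner "," + 1)) none) ","
          = PySem.Chars.find (PySem.Str.slice inner (some (PySem.Str.find inner "," + 1)) none).toList [','] from by simp,
        hx2]
    have hx3 : (if PySem.Str.find (PySem.Str.slice inner (some (PySem.Str.find inner "," + 1)) none) "," ≥ 0
          then PySem.Str.slice (PySem.Str.slice inner (some (PySem.Str.find inner "," + 1)) none) none
            (some (PySem.Str.find (PySem.Str.slice inner (some (PySem.Str.find inner "," + 1)) none) ","))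
          else PySem.Str.slice inner (some (PySem.Str.find inner "," + 1)) none).toList
        = ((inner.toList.dropWhile (· != ',')).tail).takeWhile (· != ',') := by
      by_cases hm2 : ',' ∈ (inner.toList.dropWhile (· != ',')).tail
      · obtain ⟨h02, htake2, -⟩ := pv_find_single_pos (l := (inner.toList.dropWhile (· != ',')).tail) hm2
        rw [if_pos (by rw [hf2]; omega)]
        rw [show (PySem.Str.slice (PySem.Str.slice inner (some (PySem.Str.find inner "," + 1)) none) none
            (some (PySem.Str.find (PySem.Str.slice inner (some (PySem.Str.find inner "," + 1)) none) ","))).toList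
            = PySem.List.slice (PySem.Str.slice inner (some (PySem.Str.find inner "," + 1)) none).toList none
              (some (PySem.Chars.find ((inner.toList.dropWhile (· != ',')).tail) [','])) from by
              rw [hf2]; simp]
        rw [hx2, PySem.List.slice_to _ h02]
        exact htake2
      · have hneg2 : PySem.Chars.find ((inner.toList.dropWhile (· != ',')).tail) [','] = -1 :=
          pv_find_single_neg hm2
        rw [if_neg (by rw [hf2, hneg2]; norm_num)]
        rw [hx2]
        exact (pv_takeWhile_self_of_not_mem hm2).symm
    show (if PySem.Str.find inner "," < 0 then _ else _) = _
    rw [if_neg (by rw [hf]; omega), if_pos hm]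
    rw [show pvClean (PySem.Str.slice inner none (some (PySem.Str.find inner ",")))
        = String.ofList ((inner.toList.takeWhile (· != ',')).filter pvP) from by
          rw [pv_clean_eq, hx1]]
    rw [show pvClean (if PySem.Str.find (PySem.Str.slice inner (some (PySem.Str.find inner "," + 1)) none) "," ≥ 0
          then PySem.Str.slice (PySem.Str.slice inner (some (PySem.Str.find inner "," + 1)) none) none
            (some (PySem.Str.find (PySem.Str.slice inner (some (PySem.Str.find inner "," + 1)) none) ","))
          else PySem.Str.slice inner (some (PySem.Str.find inner "," + 1)) none)
        = String.ofList (((((inner.toList.dropWhile (· != ',')).tail)).takeWhile (· != ',')).filter pvP) from by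
          rw [pv_clean_eq, hx3]]
  · have hneg : PySem.Chars.find inner.toList [','] = -1 := pv_find_single_neg hm
    show (if PySem.Str.find inner "," < 0 then _ else _) = _
    rw [if_pos (by rw [hf, hneg]; norm_num), if_neg hm]
    rw [pv_clean_eq, pv_takeWhile_self_of_not_mem hm]

theorem pv_pairIn (rest : String) :
    pvPairIn rest = PySem.Set.ofList [String.ofList (pvF0 rest.toList), String.ofList (pvF1 rest.toList)] := by
  have hinner : (if PySem.Str.find rest ")" < 0 then rest
      else PySem.Str.slice rest none (some (PySem.Str.find rest ")"))).toList
      = rest.toList.takeWhile (· != ')') := by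
    have hf : PySem.Str.find rest ")" = PySem.Chars.find rest.toList [')'] := by simp
    by_cases hm : ')' ∈ rest.toList
    · obtain ⟨h0, htake, -⟩ := pv_find_single_pos (l := rest.toList) hm
      rw [if_neg (by rw [hf]; omega)]
      rw [show (PySem.Str.slice rest none (some (PySem.Str.find rest ")"))).toList
          = PySem.List.slice rest.toList none (some (PySem.Chars.find rest.toList [')'])) from by
            rw [hf]; simp]
      rw [PySem.List.slice_to _ h0]
      exact htake
    · have hneg : PySem.Chars.find rest.toList [')'] = -1 := pv_find_single_neg hm
      rw [if_pos (by rw [hf, hneg]; norm_num)]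
      exact (pv_takeWhile_self_of_not_mem hm).symm
  have h1 : pvPairIn rest = pvTail (if PySem.Str.find rest ")" < 0 then rest
      else PySem.Str.slice rest none (some (PySem.Str.find rest ")"))) := rfl
  rw [h1, pv_tail_eq, hinner, pv_F0_eq, pv_F1_eq]

-- ===== VERDICT (by name: the statement is the Claim_ definition above) =====
theorem getDeepestPair_spec : Claim_equal_getDeepestPair := by
  intro tree th _
  show getDeepestPair tree th = getDeepestPair_alt tree th
  unfold getDeepestPair getDeepestPair_alt
  by_cases hneg : th < 0
  · rw [if_pos hneg]
    simp only [pv_neg th hneg tree.toList 0 le_rfl]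
  · rw [if_neg hneg]
    have hm := pv_master th.toNat tree.toList 0 th (by omega)
    rw [pv_skip_eq]
    cases hsk : pvSkipL th.toNat tree.toList with
    | none =>
      rw [hsk] at hm
      simp only at hm
      simp [hm]
    | some r =>
      rw [hsk] at hm
      simp only at hm
      simp [hm, pv_pairIn]
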